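-- pv_equiv track=rewrite | github.com/AbdelrhmanSror/probelm_solving_python | smallerElementToRight.py | smaller_counts2
-- ===== SOURCE A (Python) =====
-- def smaller_counts2(array):
--     result = [0] * len(array)
--     for i in range(len(array) - 1, -1, -1):
--         index_counter = i + 1
--         while index_counter < len(array):
--             if array[index_counter] < array[i]:
--                 count = 1 + result[index_counter]
--                 result[i] = count
--                 break
--             index_counter += 1
--     return result
-- ===== SOURCE B (Python) =====
-- def smaller_counts2(array):
--     n = len(array)
--     result = [0] * n
--     stack = []  # (value, chain count), top at end; values strictly increasing toward the top... popped below
--     for i in range(n - 1, -1, -1):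
--         v = array[i]
--         while stack and stack[-1][0] >= v:
--             stack.pop()
--         if stack:
--             result[i] = 1 + stack[-1][1]
--         stack.append((v, result[i]))
--     return result
-- ===== Notes on version B (the rewrite author's own statement) =====
-- stated objective: faster
-- what changed: Replaced the per-index rightward scan (O(n^2)) with a single right-to-left pass maintaining a monotonic stack of (value, chain-count) pairs, so each element is pushed and popped at most once (O(n)).
import Mathlib
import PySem

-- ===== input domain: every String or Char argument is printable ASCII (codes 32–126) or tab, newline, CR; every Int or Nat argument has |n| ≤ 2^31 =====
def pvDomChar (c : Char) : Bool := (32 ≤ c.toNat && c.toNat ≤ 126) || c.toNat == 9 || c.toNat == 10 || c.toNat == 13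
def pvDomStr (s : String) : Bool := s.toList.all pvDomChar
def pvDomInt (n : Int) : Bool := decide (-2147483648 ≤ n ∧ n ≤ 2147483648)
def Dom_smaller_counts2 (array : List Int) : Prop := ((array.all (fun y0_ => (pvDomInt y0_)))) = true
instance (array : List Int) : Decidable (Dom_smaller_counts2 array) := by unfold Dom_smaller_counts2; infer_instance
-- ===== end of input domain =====

-- B replaces A's per-index rightward scan with one right-to-left pass over a monotonic stack
-- of (value, chain-count) pairs; objective: faster (O(n) vs O(n^2)).


-- ===== PORT A =====
-- Inner 'while index_counter < len(array)' loop: scans right from j for the first element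
-- smaller than array[i] and writes 1 + result[j] at index i.  All indices reached are in
-- range (j < len, i ∈ [0,len) from the range loop), so `getD _ 0` / `set` are exact.
def innerA (a : List Int) (r : List Int) (i : Nat) (j : Nat) : List Int :=
  if _h : j < a.length then
    if a.getD j 0 < a.getD i 0 then r.set i (1 + r.getD j 0)
    else innerA a r i (j + 1)
  else r
termination_by a.length - j

-- 'for i in range(len(array)-1, -1, -1)': countdown recursion, processing index i = n-1 … 0.
def loopA (a : List Int) : Nat → List Int → List Int
  | 0, r => r
  | i + 1, r => loopA a i (innerA a r i (i + 1))

def smaller_counts2 (array : List Int) : List Int :=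
  loopA array array.length (List.replicate array.length 0)

-- ===== PORT B =====
-- One right-to-left pass (structural recursion computes the suffix first, exactly like
-- Source B's descending loop).  State: the monotonic stack (top first here; top = end in Source B)
-- and the result list; popping 'while stack and stack[-1][0] >= v' is the dropWhile.
def altStep : List Int → List (Int × Int) × List Int
  | [] => ([], [])
  | v :: rest =>
    let sr := altStep rest
    let st' := sr.1.dropWhile (fun p => v ≤ p.1)
    let c : Int := match st' with | [] => 0 | p :: _ => 1 + p.2
    ((v, c) :: st', c :: sr.2)

def smaller_counts2_alt (array : List Int) : List Int := (altStep array).2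

-- ===== PRECONDITION & SPEC =====
def Spec_smaller_counts2 (array : List Int) (out : List Int) : Prop := out = smaller_counts2_alt array
instance (array : List Int) (out : List Int) : Decidable (Spec_smaller_counts2 array out) := by unfold Spec_smaller_counts2; infer_instance

-- ===== CLAIM (what is proved, stated in full; the proofs are below) =====
def Claim_equal_smaller_counts2 : Prop := ∀ (array : List Int), Dom_smaller_counts2 array → Spec_smaller_counts2 array (smaller_counts2 array)

-- ===== LEMMAS AND PROOFS =====

-- cnt x l = chain count a virtual element of value x placed just left of l would get.
def cnt (x : Int) : List Int → Int
  | [] => 0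
  | v :: rest => if v < x then 1 + cnt v rest else cnt x rest

-- The common functional specification: specL a lists cnt (a[k]) (a.drop (k+1)).
def specL : List Int → List Int
  | [] => []
  | v :: rest => cnt v rest :: specL rest

-- Value the stack yields for a query x (pop all ≥ x, then read the top).
def popv (x : Int) : List (Int × Int) → Int
  | [] => 0
  | p :: t => if x ≤ p.1 then popv x t else 1 + p.2

theorem popv_eq_match (x : Int) : ∀ st : List (Int × Int),
    (match st.dropWhile (fun p => x ≤ p.1) with
      | [] => (0 : Int) | p :: _ => 1 + p.2) = popv x st := by
  intro st
  induction st with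
  | nil => rfl
  | cons p t ih =>
    by_cases hx : x ≤ p.1
    · simp only [List.dropWhile, decide_eq_true hx, popv, if_pos hx]
      exact ih
    · simp only [List.dropWhile, decide_eq_false hx, popv, if_neg hx]

theorem popv_dropWhile (x y : Int) (h : x ≤ y) : ∀ st : List (Int × Int),
    popv x (st.dropWhile (fun p => y ≤ p.1)) = popv x st := by
  intro st
  induction st with
  | nil => rfl
  | cons p t ih =>
    by_cases hy : y ≤ p.1
    · have hx : x ≤ p.1 := le_trans h hy
      simp only [List.dropWhile, decide_eq_true hy, popv, if_pos hx]
      exact ih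
    · simp only [List.dropWhile, decide_eq_false hy]

theorem altStep_inv (l : List Int) :
    (∀ x, popv x (altStep l).1 = cnt x l) ∧ (altStep l).2 = specL l := by
  induction l with
  | nil => exact ⟨fun x => rfl, rfl⟩
  | cons v rest ih =>
    obtain ⟨ihs, ihr⟩ := ih
    have h1 : (altStep (v :: rest)).1 =
        (v, popv v (altStep rest).1) :: (altStep rest).1.dropWhile (fun p => v ≤ p.1) := by
      simp only [altStep]
      rw [popv_eq_match]
    have h2 : (altStep (v :: rest)).2 = popv v (altStep rest).1 :: (altStep rest).2 := by
      simp only [altStep]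
      rw [popv_eq_match]
    constructor
    · intro x
      rw [h1]
      by_cases hx : x ≤ v
      · have hnv : ¬ v < x := by omega
        simp only [popv, if_pos hx]
        rw [popv_dropWhile x v hx, ihs x]
        simp [cnt, hnv]
      · have hv : v < x := by omega
        simp only [popv, if_neg hx]
        rw [ihs v]
        simp [cnt, hv]
    · rw [h2, ihr, ihs v]
      rfl

theorem alt_eq_specL (l : List Int) : smaller_counts2_alt l = specL l :=
  (altStep_inv l).2

theorem specL_length (l : List Int) : (specL l).length = l.length := by
  induction l with
  | nil => rfl
  | cons v rest ih => simp [specL, ih]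

theorem specL_getD (l : List Int) : ∀ k, k < l.length →
    (specL l).getD k 0 = cnt (l.getD k 0) (l.drop (k + 1)) := by
  induction l with
  | nil => intro k hk; simp at hk
  | cons v rest ih =>
    intro k hk
    cases k with
    | zero => simp [specL]
    | succ k => simpa [specL] using ih k (by simpa using hk)

theorem cnt_eq_zero (x : Int) (l : List Int) (h : ∀ v ∈ l, ¬ v < x) : cnt x l = 0 := by
  induction l with
  | nil => rfl
  | cons v rest ih =>
    have hv : ¬ v < x := h v (by simp)
    simp only [cnt, if_neg hv]
    exact ih (fun w hw => h w (by simp [hw]))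

theorem getD_set (r : List Int) (i k : Nat) (x : Int) (hk : k < r.length) :
    (r.set i x).getD k 0 = if i = k then x else r.getD k 0 := by
  rw [List.getD_eq_getElem _ 0 (by simpa using hk), List.getElem_set]
  split_ifs with h
  · rfl
  · rw [List.getD_eq_getElem r 0 hk]

theorem innerA_spec (a : List Int) (i : Nat) :
    ∀ j r, r.length = a.length →
    (∀ k, j ≤ k → k < a.length → r.getD k 0 = cnt (a.getD k 0) (a.drop (k + 1))) →
    innerA a r i j =
      if (a.drop j).any (fun v => v < a.getD i 0)
      then r.set i (cnt (a.getD i 0) (a.drop j))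
      else r := by
  intro j
  induction hfuel : a.length - j using Nat.strong_induction_on generalizing j with
  | _ fuel IH =>
  intro r hr hinv
  by_cases hj : j < a.length
  · have hdrop : a.drop j = a.getD j 0 :: a.drop (j + 1) := by
      rw [List.getD_eq_getElem a 0 hj]
      exact List.drop_eq_getElem_cons hj
    by_cases hlt : a.getD j 0 < a.getD i 0
    · rw [innerA, dif_pos hj, if_pos hlt, hdrop]
      have hany : ((a.getD j 0 :: a.drop (j + 1)).any (fun v => v < a.getD i 0)) = true := by
        simp only [List.any_cons, Bool.or_eq_true, decide_eq_true_eq]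
        exact Or.inl hlt
      rw [if_pos hany]
      have hc : cnt (a.getD i 0) (a.getD j 0 :: a.drop (j + 1))
          = 1 + cnt (a.getD j 0) (a.drop (j + 1)) := by
        simp only [cnt, if_pos hlt]
      rw [hc, hinv j le_rfl hj]
    · rw [innerA, dif_pos hj, if_neg hlt]
      have hrec := IH (a.length - (j + 1)) (by omega) (j + 1) rfl r hr
        (fun k hk hk' => hinv k (by omega) hk')
      rw [hrec, hdrop]
      have hcnt : cnt (a.getD i 0) (a.getD j 0 :: a.drop (j + 1))
          = cnt (a.getD i 0) (a.drop (j + 1)) := by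
        simp only [cnt, if_neg hlt]
      simp only [List.any_cons, hcnt, decide_eq_false hlt, Bool.false_or]
  · rw [innerA, dif_neg hj]
    have hnil : a.drop j = [] := List.drop_eq_nil_of_le (by omega)
    rw [hnil]
    simp

theorem loopA_spec (a : List Int) : ∀ (i : Nat) (r : List Int), i ≤ a.length →
    r.length = a.length →
    (∀ k, i ≤ k → k < a.length → r.getD k 0 = cnt (a.getD k 0) (a.drop (k + 1))) →
    (∀ k, k < i → r.getD k 0 = 0) →
    loopA a i r = specL a := by
  intro i
  induction i with
  | zero =>
    intro r _ hr hinv _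
    have h0 : loopA a 0 r = r := rfl
    rw [h0]
    apply List.ext_getElem (by rw [hr, specL_length])
    intro k h1 h2
    rw [← List.getD_eq_getElem r 0 h1, ← List.getD_eq_getElem _ 0 h2,
      specL_getD a k (by omega)]
    exact hinv k (by omega) (by omega)
  | succ i ih =>
    intro r hle hr hinv hz
    have hi : i < a.length := by omega
    have hstep := innerA_spec a i (i + 1) r hr (fun k hk hk' => hinv k hk hk')
    have hL : loopA a (i + 1) r = loopA a i (innerA a r i (i + 1)) := rfl
    rw [hL, hstep]
    by_cases hany : (a.drop (i + 1)).any (fun v => v < a.getD i 0) = true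
    · rw [if_pos hany]
      apply ih _ (by omega) (by simp [hr])
      · intro k hk hk'
        rw [getD_set r i k _ (by omega)]
        by_cases hki : i = k
        · rw [if_pos hki, hki]
        · rw [if_neg hki]
          exact hinv k (by omega) hk'
      · intro k hk
        rw [getD_set r i k _ (by omega), if_neg (by omega)]
        exact hz k (by omega)
    · rw [if_neg hany]
      apply ih _ (by omega) hr
      · intro k hk hk'
        by_cases hki : k = i
        · subst hki
          rw [hz k (by omega)]
          symm
          apply cnt_eq_zero
          intro v hv hlt
          simp only [List.any_eq_true, decide_eq_true_eq] at hany
          exact hany ⟨v, hv, hlt⟩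
        · exact hinv k (by omega) hk'
      · intro k hk
        exact hz k (by omega)

-- ===== VERDICT (by name: the statement is the Claim_ definition above) =====
theorem smaller_counts2_spec : Claim_equal_smaller_counts2 := by
  intro array _
  show smaller_counts2 array = smaller_counts2_alt array
  rw [alt_eq_specL]
  unfold smaller_counts2
  apply loopA_spec array array.length _ le_rfl (by simp)
  · intro k hk hk'; omega
  · intro k hk; simp
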